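-- pv_equiv track=rewrite | github.com/1Jayakrishnan/GFG--POTD | JULY 2025/Maximum sum of elements not part of LIS.py | nonLisMaxSum
-- ===== SOURCE A (Python) =====
-- import bisect
--
-- def nonLisMaxSum(arr):
--     n = len(arr)
--     if n == 0:
--         return 0
--
--     # Step 1: Total sum
--     total_sum = sum(arr)
--
--     # Step 2: LIS using patience sorting (O(n log n))
--     tail = []
--     dp = [0] * n  # dp[i] = length of LIS ending at index i
--
--     for i in range(n):
--         idx = bisect.bisect_left(tail, arr[i])
--         if idx == len(tail):
--             tail.append(arr[i])
--         else:
--             tail[idx] = arr[i]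
--         dp[i] = idx + 1
--
--     # Step 3: Reconstruct the LIS (reverse trace)
--     lis_len = max(dp)
--     lis = []
--     current_len = lis_len
--     last_val = float('inf')
--
--     for i in range(n - 1, -1, -1):
--         if dp[i] == current_len and arr[i] < last_val:
--             lis.append(arr[i])
--             last_val = arr[i]
--             current_len -= 1
--
--     # Step 4: Subtract LIS sum from total sum
--     lis_sum = sum(lis)
--     return total_sum - lis_sum
-- ===== SOURCE B (Python) =====
-- def nonLisMaxSum(arr):
--     n = len(arr)
--     if n == 0:
--         return 0
--
--     total_sum = sum(arr)
--
--     # LIS lengths by quadratic DP (strict '<', same dp values as patience sorting)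
--     dp = []
--     for i in range(n):
--         best = 0
--         for j in range(i):
--             if arr[j] < arr[i] and dp[j] > best:
--                 best = dp[j]
--         dp.append(best + 1)
--
--     # Reconstruct the LIS (reverse trace), identical to A
--     lis_len = max(dp)
--     lis = []
--     current_len = lis_len
--     last_val = float('inf')
--     for i in range(n - 1, -1, -1):
--         if dp[i] == current_len and arr[i] < last_val:
--             lis.append(arr[i])
--             last_val = arr[i]
--             current_len -= 1
--
--     return total_sum - sum(lis)
-- ===== Notes on version B (the rewrite author's own statement) =====
-- stated objective: alternative
-- what changed: Step 2's patience sorting with bisect (tail array + binary search) is replaced by a nested O(n^2) DP computing dp[i] = 1 + max(dp[j] : j < i, arr[j] < arr[i]); total sum, reverse-trace reconstruction and subtraction are unchanged.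
import Mathlib
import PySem

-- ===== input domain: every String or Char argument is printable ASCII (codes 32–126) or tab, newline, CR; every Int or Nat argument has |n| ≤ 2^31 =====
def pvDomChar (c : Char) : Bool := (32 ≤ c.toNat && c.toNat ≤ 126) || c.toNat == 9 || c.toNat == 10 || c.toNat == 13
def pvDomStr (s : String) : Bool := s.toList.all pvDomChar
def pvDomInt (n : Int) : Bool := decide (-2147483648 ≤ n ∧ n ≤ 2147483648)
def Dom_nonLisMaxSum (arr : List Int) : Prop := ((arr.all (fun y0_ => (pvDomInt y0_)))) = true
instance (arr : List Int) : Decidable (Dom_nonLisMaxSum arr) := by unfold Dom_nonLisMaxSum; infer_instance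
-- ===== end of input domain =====

-- B replaces only the LIS-length computation: patience sorting with bisect becomes a nested
-- O(n^2) DP; total sum, reverse-trace reconstruction and subtraction are unchanged (objective: alternative).

-- ===== PORT A =====
-- `last_val = float('inf')` is ported as `Option Int` (none = +inf); `ltLast lv v` is `v < last_val`.
def ltLast : Option Int → Int → Bool
  | none, _ => true
  | some lv, v => decide (v < lv)

-- Step 3 of BOTH Pythons (the loop body is byte-for-byte identical in A and in B, so it is one
-- shared helper): the reverse trace over the (arr[i], dp[i]) pairs, i from n-1 down to 0.
def traceStep (st : List Int × Int × Option Int) (vd : Int × Int) : List Int × Int × Option Int :=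
  if vd.2 = st.2.1 ∧ ltLast st.2.2 vd.1 = true then (st.1 ++ [vd.1], st.2.1 - 1, some vd.1) else st

def reverseTrace (pairs : List (Int × Int)) (lisLen : Int) : List Int :=
  (pairs.reverse.foldl traceStep ([], lisLen, none)).1

-- A's Step 2 loop body: `bisect.bisect_left` is PySem.List.bisectLeft; dp is prefilled with zeros
-- and dp[i] is assigned in index order, which is the same as appending idx+1.
def stepA (s : List Int × List Int) (x : Int) : List Int × List Int :=
  let idx := PySem.List.bisectLeft s.1 x
  let tail' := if idx = s.1.length then s.1 ++ [x] else s.1.set idx x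
  (tail', s.2 ++ [(idx : Int) + 1])

def nonLisMaxSum (arr : List Int) : Int :=
  if arr.length = 0 then 0 else
    let totalSum := arr.foldl (· + ·) 0
    let dp := (arr.foldl stepA ([], [])).2
    let lisLen := (PySem.List.max? dp (fun v => v)).getD 0
    let lis := reverseTrace (arr.zip dp) lisLen
    totalSum - lis.foldl (· + ·) 0

-- ===== PORT B =====
-- B's inner loop: best dp[j] over processed (arr[j], dp[j]) pairs with arr[j] < x.
def innerBest (pairs : List (Int × Int)) (x : Int) : Int :=
  pairs.foldl (fun best vd => if vd.1 < x ∧ best < vd.2 then vd.2 else best) 0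

-- B's outer Step 2 loop body: dp.append(best + 1), keeping the value alongside.
def stepB (pairs : List (Int × Int)) (x : Int) : List (Int × Int) :=
  pairs ++ [(x, innerBest pairs x + 1)]

def nonLisMaxSum_alt (arr : List Int) : Int :=
  if arr.length = 0 then 0 else
    let totalSum := arr.foldl (· + ·) 0
    let dp := (arr.foldl stepB []).map Prod.snd
    let lisLen := (PySem.List.max? dp (fun v => v)).getD 0
    let lis := reverseTrace (arr.zip dp) lisLen
    totalSum - lis.foldl (· + ·) 0

-- ===== PRECONDITION & SPEC =====
def Spec_nonLisMaxSum (arr : List Int) (out : Int) : Prop := out = nonLisMaxSum_alt arr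
instance (arr : List Int) (out : Int) : Decidable (Spec_nonLisMaxSum arr out) := by unfold Spec_nonLisMaxSum; infer_instance

-- ===== CLAIM (what is proved, stated in full; the proofs are below) =====
def Claim_equal_nonLisMaxSum : Prop := ∀ (arr : List Int), Dom_nonLisMaxSum arr → Spec_nonLisMaxSum arr (nonLisMaxSum arr)

-- ===== LEMMAS AND PROOFS =====

-- countP of a list whose p-elements are exactly the first k positions is k.
theorem countP_of_indexed (l : List Int) (p : Int → Bool) (k : Nat) (hk : k ≤ l.length)
    (h1 : ∀ j (hj : j < l.length), j < k → p l[j])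
    (h2 : ∀ j (hj : j < l.length), k ≤ j → ¬ p l[j]) :
    l.countP p = k := by
  induction l generalizing k with
  | nil => simpa using (Nat.le_zero.mp (by simpa using hk)).symm
  | cons a t ih =>
    cases k with
    | zero =>
      have ha : ¬ p a := h2 0 (by simp) (Nat.zero_le _)
      have : t.countP p = 0 := ih 0 (Nat.zero_le _)
        (by intro j hj hj0; omega)
        (by intro j hj _; exact h2 (j+1) (by simpa using Nat.succ_lt_succ hj) (Nat.zero_le _))
      simp [ha, this]
    | succ k' =>
      have ha : p a := h1 0 (by simp) (Nat.succ_pos _)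
      have ht : t.countP p = k' := ih k' (by simpa using hk)
        (by intro j hj hjk; exact h1 (j+1) (by simpa using Nat.succ_lt_succ hj) (by omega))
        (by intro j hj hjk; exact h2 (j+1) (by simpa using Nat.succ_lt_succ hj) (by omega))
      simp [ha, ht]

-- On a strictly sorted list, bisect_left x is the number of elements < x.
theorem bl_eq_countP (l : List Int) (x : Int) (hs : l.Pairwise (· < ·)) :
    PySem.List.bisectLeft l x = l.countP (fun t => decide (t < x)) := by
  obtain ⟨hle, hpre, hsuf⟩ := PySem.List.bisectLeft_spec l x (hs.imp le_of_lt)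
  exact (countP_of_indexed l _ _ hle
    (fun j hj hjk => by simpa using hpre j hj hjk)
    (fun j hj hjk => by simpa using not_lt.mpr (hsuf j hj hjk))).symm

theorem mem_take_of_indexed (l : List Int) (p : Int → Bool) (k : Nat)
    (h1 : ∀ j (hj : j < l.length), j < k → p l[j]) :
    ∀ a ∈ l.take k, p a := by
  intro a ha
  obtain ⟨j, hj, rfl⟩ := List.mem_iff_getElem.mp ha
  have hjl : j < l.length := lt_of_lt_of_le hj (by simp)
  have := List.getElem_take (xs := l) (i := j) (h := hj)
  rw [this]
  exact h1 j hjl (lt_of_lt_of_le hj (by simp))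

theorem mem_drop_of_indexed (l : List Int) (p : Int → Bool) (k : Nat)
    (h2 : ∀ j (hj : j < l.length), k ≤ j → ¬ p l[j]) :
    ∀ a ∈ l.drop k, ¬ p a := by
  intro a ha
  obtain ⟨j, hj, rfl⟩ := List.mem_iff_getElem.mp ha
  have hjl : k + j < l.length := by simp [List.length_drop] at hj; omega
  have heq : (l.drop k)[j] = l[k + j]'hjl := by rw [List.getElem_drop]
  rw [heq]
  exact h2 (k + j) hjl (by omega)

theorem set_at_length (T1 : List Int) (z x : Int) (T2 : List Int) :
    (T1 ++ z :: T2).set T1.length x = T1 ++ x :: T2 := by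
  induction T1 with
  | nil => simp
  | cons a t ih => simp [ih]

theorem innerBest_append (pairs : List (Int × Int)) (x d y : Int) :
    innerBest (pairs ++ [(x, d)]) y =
      if x < y ∧ innerBest pairs y < d then d else innerBest pairs y := by
  simp [innerBest, List.foldl_append]

-- The invariant tying A's tail to B's processed (value, dp) pairs.
def TInv (tail : List Int) (pairs : List (Int × Int)) : Prop :=
  tail.Pairwise (· < ·) ∧
    ∀ y : Int, ((tail.countP (fun t => decide (t < y)) : Int) = innerBest pairs y)

-- One step of A and one step of B preserve the invariant, and produce the same dp entry.
theorem step_pres (dpA : List Int) (tail : List Int) (pairs : List (Int × Int)) (x : Int)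
    (h : TInv tail pairs) :
    TInv (stepA (tail, dpA) x).1 (stepB pairs x) ∧
      (stepA (tail, dpA) x).2 = dpA ++ [innerBest pairs x + 1] := by
  obtain ⟨hs, hc⟩ := h
  obtain ⟨hle, hpre, hsuf⟩ := PySem.List.bisectLeft_spec tail x (hs.imp le_of_lt)
  have hbl : PySem.List.bisectLeft tail x = tail.countP (fun t => decide (t < x)) :=
    bl_eq_countP tail x hs
  set c := PySem.List.bisectLeft tail x with hcdef
  have hT1 : ∀ a ∈ tail.take c, a < x := by
    have := mem_take_of_indexed tail (fun t => decide (t < x)) c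
      (fun j hj hjk => by simpa using hpre j hj hjk)
    intro a ha; simpa using this a ha
  have hT2 : ∀ a ∈ tail.drop c, x ≤ a := by
    have := mem_drop_of_indexed tail (fun t => decide (t < x)) c
      (fun j hj hjk => by simpa using not_lt.mpr (hsuf j hj hjk))
    intro a ha; simpa using this a ha
  have hsplit : tail.take c ++ tail.drop c = tail := List.take_append_drop c tail
  have hcx : (c : Int) = innerBest pairs x := by rw [hbl]; exact hc x
  have hlen1 : (tail.take c).length = c := by simp [hle]
  have hdp2 : (stepA (tail, dpA) x).2 = dpA ++ [innerBest pairs x + 1] := by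
    simp [stepA]
    exact hcx
  rcases Nat.eq_or_lt_of_le hle with hceq | hclt
  · -- append case: idx == len(tail)
    have hall : ∀ a ∈ tail, a < x := by
      intro a ha; exact hT1 a (by rwa [hceq, List.take_length])
    have h1 : (stepA (tail, dpA) x).1 = tail ++ [x] := by simp [stepA, ← hcdef, hceq]
    refine ⟨⟨?_, ?_⟩, hdp2⟩
    · rw [h1, List.pairwise_append]
      exact ⟨hs, by simp, by intro a ha b hb; simp at hb; subst hb; exact hall a ha⟩
    · intro y
      rw [h1, stepB, innerBest_append, List.countP_append, ← hc y, ← hcx]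
      have f1 : tail.countP (fun t => decide (t < y)) ≤ c := by
        have := List.countP_le_length (p := fun t => decide (t < y)) (l := tail)
        omega
      by_cases hxy : x < y
      · have f2 : tail.countP (fun t => decide (t < y)) = c := by
          rw [List.countP_eq_length.mpr (fun a ha => by
            simpa using lt_trans (hall a ha) hxy)]
          omega
        have e1 : List.countP (fun t => decide (t < y)) [x] = 1 := by simp [hxy]
        have hlt : ((tail.countP (fun t => decide (t < y)) : Nat) : Int) < (c : Int) + 1 := by
          push_cast; omega
        rw [e1, if_pos (And.intro hxy hlt)]
        push_cast; omega
      · have e1 : List.countP (fun t => decide (t < y)) [x] = 0 := by simp [hxy]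
        rw [e1, if_neg (fun hcon => hxy hcon.1)]
        push_cast; omega
  · -- set case: idx < len(tail)
    obtain ⟨z, T2', hdrop⟩ : ∃ z T2', tail.drop c = z :: T2' := by
      have hne : tail.drop c ≠ [] := by simp [List.drop_eq_nil_iff]; omega
      cases hd : tail.drop c with
      | nil => exact absurd hd hne
      | cons z T2' => exact ⟨z, T2', rfl⟩
    have hset : tail.set c x = tail.take c ++ x :: T2' := by
      have hgen := set_at_length (tail.take c) z x T2'
      rw [hlen1] at hgen
      conv_lhs => rw [← hsplit, hdrop]
      exact hgen
    have hzx : x ≤ z := hT2 z (by rw [hdrop]; simp)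
    have hpd : (tail.drop c).Pairwise (· < ·) := hs.drop
    have hz2 : ∀ a ∈ T2', z < a := by
      rw [hdrop] at hpd; exact (List.pairwise_cons.mp hpd).1
    have h1 : (stepA (tail, dpA) x).1 = tail.set c x := by
      simp [stepA, ← hcdef, Nat.ne_of_lt hclt]
    refine ⟨⟨?_, ?_⟩, hdp2⟩
    · rw [h1, hset, List.pairwise_append]
      refine ⟨by rw [← hsplit] at hs; exact (List.pairwise_append.mp hs).1, ?_, ?_⟩
      · rw [List.pairwise_cons]
        refine ⟨fun a ha => lt_of_le_of_lt hzx (hz2 a ha), ?_⟩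
        rw [hdrop] at hpd; exact (List.pairwise_cons.mp hpd).2
      · intro a ha b hb
        have hax : a < x := hT1 a ha
        rcases List.mem_cons.mp hb with rfl | hb2
        · exact hax
        · exact lt_trans hax (lt_of_le_of_lt hzx (hz2 b hb2))
    · intro y
      have hcold : tail.countP (fun t => decide (t < y)) =
          (tail.take c).countP (fun t => decide (t < y)) +
            ((z :: T2').countP (fun t => decide (t < y))) := by
        conv_lhs => rw [← hsplit, hdrop]
        rw [List.countP_append]
      rw [h1, hset, stepB, innerBest_append, List.countP_append, ← hc y, ← hcx, hcold]
      have f3 : ¬ z < y → T2'.countP (fun t => decide (t < y)) = 0 := fun hzy =>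
        List.countP_eq_zero.mpr (fun a ha => by
          simp only [decide_eq_true_eq, not_lt]
          exact le_trans (not_lt.mp hzy) (le_of_lt (hz2 a ha)))
      by_cases hxy : x < y
      · have hf2 : (tail.take c).countP (fun t => decide (t < y)) = c := by
          rw [List.countP_eq_length.mpr (fun a ha => by
            simpa using lt_trans (hT1 a ha) hxy)]
          exact hlen1
        by_cases hzy : z < y
        · have e1 : List.countP (fun t => decide (t < y)) (x :: T2') =
              T2'.countP (fun t => decide (t < y)) + 1 := by
            simp [hxy]
          have e2 : List.countP (fun t => decide (t < y)) (z :: T2') =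
              T2'.countP (fun t => decide (t < y)) + 1 := by
            simp [hzy]
          rw [e1, e2]
          rw [if_neg (by rintro ⟨-, hlt⟩; push_cast at hlt; omega)]
        · have hf3 := f3 hzy
          have e1 : List.countP (fun t => decide (t < y)) (x :: T2') = 1 := by
            simp [hxy, hf3]
          have e2 : List.countP (fun t => decide (t < y)) (z :: T2') = 0 := by
            simp [hzy, hf3]
          have hlt : (((tail.take c).countP (fun t => decide (t < y)) + 0 : Nat) : Int) <
              (c : Int) + 1 := by
            push_cast; omega
          rw [e1, e2, if_pos (And.intro hxy hlt)]
          push_cast; omega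
      · have hzy : ¬ z < y := fun hzy => hxy (lt_of_le_of_lt hzx hzy)
        have hf3 := f3 hzy
        have e1 : List.countP (fun t => decide (t < y)) (x :: T2') = 0 := by
          simp [hxy, hf3]
        have e2 : List.countP (fun t => decide (t < y)) (z :: T2') = 0 := by
          simp [hzy, hf3]
        rw [e1, e2, if_neg (fun hcon => hxy hcon.1)]

-- Folding A's step and B's step over the same input keeps TInv and keeps dp = map snd pairs.
theorem fold_rel (xs : List Int) : ∀ (tail dpA : List Int) (pairs : List (Int × Int)),
    TInv tail pairs → dpA = pairs.map Prod.snd →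
    TInv (xs.foldl stepA (tail, dpA)).1 (xs.foldl stepB pairs) ∧
      (xs.foldl stepA (tail, dpA)).2 = (xs.foldl stepB pairs).map Prod.snd := by
  induction xs with
  | nil => intro tail dpA pairs hI hdp; exact ⟨hI, hdp⟩
  | cons x xs ih =>
    intro tail dpA pairs hI hdp
    obtain ⟨hI', hdp'⟩ := step_pres dpA tail pairs x hI
    have hfold : stepA (tail, dpA) x = ((stepA (tail, dpA) x).1, (stepA (tail, dpA) x).2) := rfl
    simp only [List.foldl_cons]
    rw [hfold, hdp']
    exact ih _ _ _ hI' (by simp [stepB, hdp])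

theorem dp_eq (arr : List Int) :
    (arr.foldl stepA ([], [])).2 = (arr.foldl stepB []).map Prod.snd := by
  exact (fold_rel arr [] [] [] ⟨List.Pairwise.nil, fun y => by simp [innerBest]⟩ rfl).2

-- ===== VERDICT (by name: the statement is the Claim_ definition above) =====
theorem nonLisMaxSum_spec : Claim_equal_nonLisMaxSum := by
  intro arr _
  unfold Spec_nonLisMaxSum nonLisMaxSum nonLisMaxSum_alt
  rw [dp_eq]
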